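-- pv_equiv track=rewrite | github.com/liupengsay/PyIsTheBestLang | algorithm/src/dp/bag_dp.py | bin_split
-- ===== SOURCE A (Python) =====
-- def bin_split(num):
--     # 二进制优化是指 1.2.4.x这样连续的而不是二进制10101对应的1
--     assert num > 0
--     lst = []
--     x = 1
--     while x <= num:
--         lst.append(x)
--         num -= x
--         x *= 2
--     if num:
--         lst.append(num)
--     return lst
-- ===== SOURCE B (Python) =====
-- def bin_split(num):
--     assert num > 0
--     # closed form: n = number of consecutive powers 1,2,4,... that fit
--     n = (num + 1).bit_length() - 1
--     lst = [1 << i for i in range(n)]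
--     rem = num - ((1 << n) - 1)
--     if rem:
--         lst.append(rem)
--     return lst
-- ===== Notes on version B (the rewrite author's own statement) =====
-- stated objective: simpler
-- what changed: Replaces the iterative subtraction loop by a closed-form count n = (num+1).bit_length()-1 of the consecutive powers of two, building them directly and appending the single remainder num - (2^n - 1) if nonzero.
import Mathlib
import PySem

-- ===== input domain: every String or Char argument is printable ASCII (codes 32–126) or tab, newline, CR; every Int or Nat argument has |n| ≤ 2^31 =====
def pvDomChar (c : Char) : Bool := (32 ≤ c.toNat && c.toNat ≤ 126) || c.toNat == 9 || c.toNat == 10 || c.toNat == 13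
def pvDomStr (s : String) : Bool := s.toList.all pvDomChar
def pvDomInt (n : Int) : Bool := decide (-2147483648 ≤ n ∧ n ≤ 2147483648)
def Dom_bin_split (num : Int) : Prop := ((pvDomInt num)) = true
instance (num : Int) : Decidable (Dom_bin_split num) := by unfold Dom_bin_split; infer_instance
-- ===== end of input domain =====

-- B replaces A's iterative subtraction loop by a closed-form power count (bit_length)
-- plus a single remainder append; objective: simpler. A and B both raise (assert) for num ≤ 0 (excluded by Pre_).


-- ===== PORT A =====
-- A's while loop; the guard 1 ≤ x is a totality guard only (the loop is always entered with x = 1 and doubles x)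
def binSplitLoop (num x : Int) : List Int :=
  if h : 1 ≤ x ∧ x ≤ num then
    x :: binSplitLoop (num - x) (2 * x)
  else if num ≠ 0 then [num] else []
termination_by (num + 1 - x).toNat
decreasing_by omega

def bin_split (num : Int) : List Int := binSplitLoop num 1

-- ===== PORT B =====
-- n = (num+1).bit_length() - 1 = Nat.log2 (num+1) for num ≥ 1 (num+1 ≥ 2)
def bin_split_alt (num : Int) : List Int :=
  let n : Nat := Nat.log2 (num + 1).toNat
  let lst : List Int := (List.range n).map (fun i => (2 : Int) ^ i)
  let rem : Int := num - ((2 : Int) ^ n - 1)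
  if rem ≠ 0 then lst ++ [rem] else lst

-- ===== PRECONDITION & SPEC =====
-- A executes 'assert num > 0' and raises AssertionError otherwise; Pre_ excludes exactly those inputs.
def Pre_bin_split (num : Int) : Prop := 1 ≤ num
instance (num : Int) : Decidable (Pre_bin_split num) := by unfold Pre_bin_split; infer_instance
def pvWitness_bin_split : Int := (13)

def Spec_bin_split (num : Int) (out : List Int) : Prop := out = bin_split_alt num
instance (num : Int) (out : List Int) : Decidable (Spec_bin_split num out) := by unfold Spec_bin_split; infer_instance

-- ===== CLAIM (what is proved, stated in full; the proofs are below) =====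
def Claim_equal_bin_split : Prop := ∀ (num : Int), Dom_bin_split num → Pre_bin_split num → Spec_bin_split num (bin_split num)

-- ===== LEMMAS AND PROOFS =====

-- Invariant of A's loop: called with x = 2^k on a remainder bracketed by 2^k(2^m-1) ≤ num < 2^k(2^(m+1)-1),
-- it emits exactly the m powers 2^k,…,2^(k+m-1) and then the nonzero remainder.
theorem binSplitLoop_eq (m : Nat) : ∀ (k : Nat) (num : Int), 0 ≤ num →
    (2 : Int) ^ k * (2 ^ m - 1) ≤ num → num < 2 ^ k * (2 ^ (m + 1) - 1) →
    binSplitLoop num ((2 : Int) ^ k) =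
      (List.range m).map (fun i => (2 : Int) ^ (k + i)) ++
        (if num - 2 ^ k * (2 ^ m - 1) ≠ 0 then [num - 2 ^ k * (2 ^ m - 1)] else []) := by
  induction m with
  | zero =>
      intro k num h0 _ hub
      have hk : (0 : Int) < 2 ^ k := by positivity
      rw [binSplitLoop]
      have hle : ¬ ((2 : Int) ^ k ≤ num) := by
        simp only [pow_succ] at hub; push_neg; nlinarith
      simp only [pow_zero] at *
      rw [dif_neg (by push_neg; intro _; linarith)]
      simp only [List.range_zero, List.map_nil, List.nil_append]
      split_ifs with h1 h2 <;> simp_all <;> omega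
  | succ m ih =>
      intro k num h0 hlb hub
      have hk : (0 : Int) < 2 ^ k := by positivity
      have hm1 : (1 : Int) ≤ 2 ^ m := one_le_pow₀ (by norm_num)
      have hm : (2 : Int) ≤ 2 ^ (m + 1) := by rw [pow_succ]; linarith
      have hxle : (2 : Int) ^ k ≤ num := by
        have h1m : (1 : Int) ≤ 2 ^ (m + 1) - 1 := by linarith
        have h2 := mul_le_mul_of_nonneg_left h1m hk.le
        rw [mul_one] at h2
        linarith
      rw [binSplitLoop, dif_pos ⟨one_le_pow₀ (by norm_num), hxle⟩]
      have h2x : (2 : Int) * 2 ^ k = 2 ^ (k + 1) := by ring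
      rw [h2x]
      have hlb' : (2 : Int) ^ (k + 1) * (2 ^ m - 1) ≤ num - 2 ^ k := by
        have : (2 : Int) ^ (k + 1) * (2 ^ m - 1) = 2 ^ k * (2 ^ (m + 1) - 1) - 2 ^ k := by
          simp [pow_succ]; ring
        linarith
      have hub' : num - 2 ^ k < 2 ^ (k + 1) * (2 ^ (m + 1) - 1) := by
        have : (2 : Int) ^ (k + 1) * (2 ^ (m + 1) - 1) = 2 ^ k * (2 ^ (m + 2) - 1) - 2 ^ k := by
          simp [pow_succ]; ring
        linarith
      rw [ih (k + 1) (num - 2 ^ k) (by linarith) hlb' hub']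
      have hrem : num - 2 ^ k - (2 : Int) ^ (k + 1) * (2 ^ m - 1) =
          num - 2 ^ k * (2 ^ (m + 1) - 1) := by simp [pow_succ]; ring
      rw [hrem, List.range_succ_eq_map]
      simp only [List.map_cons, List.map_map, List.cons_append, Nat.add_zero]
      congr 1
      refine congrArg₂ (· ++ ·) (List.map_congr_left ?_) rfl
      intro i _
      simp only [Function.comp_apply, Nat.succ_eq_add_one]
      congr 1
      omega

-- log2 brackets: 2^(log2 n) ≤ n < 2^(log2 n + 1) for n ≥ 1 (Nat side)
theorem log2_bracket (n : Nat) (h : 1 ≤ n) :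
    2 ^ Nat.log2 n ≤ n ∧ n < 2 ^ (Nat.log2 n + 1) := by
  have hne : n ≠ 0 := by omega
  constructor
  · by_contra hc
    push_neg at hc
    have := (Nat.log2_lt hne).mpr hc
    omega
  · have : Nat.log2 n < Nat.log2 n + 1 := Nat.lt_succ_self _
    exact (Nat.log2_lt hne).mp this

-- ===== VERDICT (by name: the statement is the Claim_ definition above) =====
theorem bin_split_spec : Claim_equal_bin_split := by
  intro num _ hpre
  unfold Pre_bin_split at hpre
  unfold Spec_bin_split bin_split bin_split_alt
  set n := Nat.log2 (num + 1).toNat with hn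
  have h1 : 1 ≤ (num + 1).toNat := by omega
  obtain ⟨hlo, hhi⟩ := log2_bracket (num + 1).toNat h1
  have hloZ : (2 : Int) ^ n ≤ num + 1 := by
    have := Int.toNat_of_nonneg (a := num + 1) (by omega)
    calc ((2 : Int) ^ n) = ((2 ^ n : Nat) : Int) := by push_cast; ring
    _ ≤ (((num + 1).toNat : Nat) : Int) := by exact_mod_cast hlo
    _ = num + 1 := this
  have hhiZ : num + 1 < (2 : Int) ^ (n + 1) := by
    have := Int.toNat_of_nonneg (a := num + 1) (by omega)
    calc num + 1 = (((num + 1).toNat : Nat) : Int) := this.symm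
    _ < ((2 ^ (n + 1) : Nat) : Int) := by exact_mod_cast hhi
    _ = (2 : Int) ^ (n + 1) := by push_cast; ring
  have key := binSplitLoop_eq n 0 num (by omega)
    (by simp only [pow_zero, one_mul]; linarith)
    (by simp only [pow_zero, one_mul]; linarith)
  simp only [pow_zero] at key
  rw [key]
  simp only [one_mul, Nat.zero_add]
  split_ifs with h1' <;> simp_all
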